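-- pv_equiv track=rewrite | github.com/Datthatreya-Bhatt/GFG-Problem-of-the-day | day-187.py | maxTip
-- ===== SOURCE A (Python) =====
-- from typing import List
--
-- def maxTip(n: int, a: int, b: int, arr: List[int], brr: List[int]) -> int:
--     # code here
--     tips = [[0, 0] for _ in range(n)]
--     for i in range(n):
--         tips[i][0] = arr[i]
--         tips[i][1] = brr[i]
--     tips.sort(key=lambda x: abs(x[0] - x[1]), reverse=True)
--
--     total_tips = 0
--     for tip in tips:
--         if (tip[0] > tip[1] and a > 0) or (b == 0):
--             total_tips += tip[0]
--             a -= 1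
--         else:
--             total_tips += tip[1]
--             b -= 1
--
--     return total_tips
-- ===== SOURCE B (Python) =====
-- def maxTip(n, a, b, arr, brr):
--     # Give every order to B, then flip the best "gains" (arr[i]-brr[i]) to A:
--     # at least n-b orders must go to A, at most a may, and positive gains are worth taking.
--     gains = sorted((arr[i] - brr[i] for i in range(n)), reverse=True)
--     base = sum(brr[i] for i in range(n))
--     p = sum(1 for g in gains if g > 0)
--     k = min(a, max(p, n - b))
--     return base + sum(gains[:k])
-- ===== Notes on version B (the rewrite author's own statement) =====
-- stated objective: alternative
-- what changed: Replaces A's stateful greedy simulation (fold over pairs sorted by |arr-brr| with live a/b counters) by a closed-form selection: give every order to worker B, sort the gains arr[i]-brr[i] descending, and add the top k = min(a, max(#positive gains, n-b)) gains; no per-order counter loop remains.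
-- outside the precondition, e.g. on maxTip(2, 0, 1, [5, 4], [1, 1]): A returns 5, B returns 2; on maxTip(1, 1, -1, [3], [5]): A returns 5, B returns 3
import Mathlib
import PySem

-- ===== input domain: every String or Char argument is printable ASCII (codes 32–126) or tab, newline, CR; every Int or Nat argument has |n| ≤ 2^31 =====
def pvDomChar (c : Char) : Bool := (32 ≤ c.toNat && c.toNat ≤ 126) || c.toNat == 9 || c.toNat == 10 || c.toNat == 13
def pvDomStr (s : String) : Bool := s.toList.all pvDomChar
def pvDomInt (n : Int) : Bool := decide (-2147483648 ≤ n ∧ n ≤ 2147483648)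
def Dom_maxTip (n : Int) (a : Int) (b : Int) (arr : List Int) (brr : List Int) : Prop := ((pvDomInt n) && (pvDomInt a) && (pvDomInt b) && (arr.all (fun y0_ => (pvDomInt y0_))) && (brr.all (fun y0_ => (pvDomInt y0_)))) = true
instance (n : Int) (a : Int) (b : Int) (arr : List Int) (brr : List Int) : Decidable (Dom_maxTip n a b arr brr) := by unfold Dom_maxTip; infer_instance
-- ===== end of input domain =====

-- B replaces A's stateful greedy fold over |arr-brr|-sorted pairs by a closed-form
-- top-k gain selection; an alternative of the same asymptotic cost.


-- ===== PORT A =====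
def maxTip (n : Int) (a : Int) (b : Int) (arr : List Int) (brr : List Int) : Int :=
  -- tips[i] = [arr[i], brr[i]] for i in range(n)
  let tips : List (Int × Int) :=
    (PySem.List.pyRange 0 n 1).map
      (fun i => (PySem.List.pyGetD arr i 0, PySem.List.pyGetD brr i 0))
  -- tips.sort(key=lambda x: abs(x[0]-x[1]), reverse=True)
  let tips := PySem.List.sorted tips (fun x => |x.1 - x.2|) true
  -- greedy loop over (total_tips, a, b)
  let st := tips.foldl
    (fun (st : Int × Int × Int) tip =>
      if (tip.2 < tip.1 ∧ 0 < st.2.1) ∨ st.2.2 = 0 then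
        (st.1 + tip.1, st.2.1 - 1, st.2.2)
      else
        (st.1 + tip.2, st.2.1, st.2.2 - 1))
    (0, a, b)
  st.1

-- ===== PORT B =====
def maxTip_alt (n : Int) (a : Int) (b : Int) (arr : List Int) (brr : List Int) : Int :=
  -- gains = sorted((arr[i]-brr[i] for i in range(n)), reverse=True)
  let gains := PySem.List.sorted
    ((PySem.List.pyRange 0 n 1).map
      (fun i => PySem.List.pyGetD arr i 0 - PySem.List.pyGetD brr i 0))
    (fun g => g) true
  -- base = sum(brr[i] for i in range(n))
  let base := ((PySem.List.pyRange 0 n 1).map (fun i => PySem.List.pyGetD brr i 0)).sum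
  -- p = sum(1 for g in gains if g > 0)
  let p : Int := (gains.countP (fun g => decide (0 < g)) : Int)
  -- k = min(a, max(p, n - b))
  let k := min a (max p (n - b))
  -- base + sum(gains[:k])
  base + (PySem.List.slice gains none (some k)).sum

-- ===== PRECONDITION & SPEC =====
-- Pre_ restricts to the problem's natural domain: nonnegative caps that cover all n
-- orders (0 ≤ a, 0 ≤ b, n ≤ a+b) and lists long enough (A raises IndexError otherwise);
-- outside it A silently assigns orders beyond the caps (counters go negative), an
-- artefact no caller of this cap-constrained problem hits.
def Pre_maxTip (n : Int) (a : Int) (b : Int) (arr : List Int) (brr : List Int) : Prop :=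
  0 ≤ a ∧ 0 ≤ b ∧ n ≤ a + b ∧ n ≤ (arr.length : Int) ∧ n ≤ (brr.length : Int)
instance (n : Int) (a : Int) (b : Int) (arr : List Int) (brr : List Int) : Decidable (Pre_maxTip n a b arr brr) := by unfold Pre_maxTip; infer_instance

def pvWitness_maxTip : Int × Int × Int × List Int × List Int := (3, 1, 2, [5, 1, 4], [2, 3, 3])

def Spec_maxTip (n : Int) (a : Int) (b : Int) (arr : List Int) (brr : List Int) (out : Int) : Prop := out = maxTip_alt n a b arr brr
instance (n : Int) (a : Int) (b : Int) (arr : List Int) (brr : List Int) (out : Int) : Decidable (Spec_maxTip n a b arr brr out) := by unfold Spec_maxTip; infer_instance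

-- ===== CLAIM (what is proved, stated in full; the proofs are below) =====
def Claim_equal_maxTip : Prop := ∀ (n : Int) (a : Int) (b : Int) (arr : List Int) (brr : List Int), Dom_maxTip n a b arr brr → Pre_maxTip n a b arr brr → Spec_maxTip n a b arr brr (maxTip n a b arr brr)

-- ===== LEMMAS AND PROOFS =====

-- the greedy loop of A, as a structural recursion on the sorted list
def pvGreedy : List (Int × Int) → Int → Int → Int
  | [], _, _ => 0
  | (x, y) :: t, a, b =>
      if (y < x ∧ 0 < a) ∨ b = 0 then x + pvGreedy t (a - 1) b
      else y + pvGreedy t a (b - 1)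

-- sum of the k largest elements of s (k : Int, clamped at 0)
def pvTopk (s : List Int) (k : Int) : Int :=
  ((PySem.List.sorted s (fun g => g) true).take k.toNat).sum

lemma pvGreedy_foldl (L : List (Int × Int)) : ∀ (tot a b : Int),
    (L.foldl
      (fun (st : Int × Int × Int) tip =>
        if (tip.2 < tip.1 ∧ 0 < st.2.1) ∨ st.2.2 = 0 then
          (st.1 + tip.1, st.2.1 - 1, st.2.2)
        else
          (st.1 + tip.2, st.2.1, st.2.2 - 1))
      (tot, a, b)).1 = tot + pvGreedy L a b := by
  induction L with
  | nil => intro tot a b; simp [pvGreedy]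
  | cons hd t ih =>
    intro tot a b
    obtain ⟨x, y⟩ := hd
    by_cases hc : (y < x ∧ 0 < a) ∨ b = 0
    · simp only [List.foldl_cons, pvGreedy, if_pos hc, ih]; omega
    · simp only [List.foldl_cons, pvGreedy, if_neg hc, ih]; omega

lemma pvGreedy_b0 (L : List (Int × Int)) : ∀ a : Int, pvGreedy L a 0 = (L.map Prod.fst).sum := by
  induction L with
  | nil => intro a; simp [pvGreedy]
  | cons hd t ih =>
    intro a
    obtain ⟨x, y⟩ := hd
    simp [pvGreedy, ih]

-- descending sort is determined by the multiset
lemma pvSortedDesc_unique (s ys : List Int) (hp : ys.Perm s) (hs : ys.Pairwise (fun u v => v ≤ u)) :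
    PySem.List.sorted s (fun g => g) true = ys :=
  List.Perm.eq_of_pairwise (fun _ _ _ _ h1 h2 => le_antisymm h2 h1)
    (PySem.List.sorted_pairwise_rev s (fun g => g)) hs
    ((PySem.List.sorted_perm s (fun g => g) true).trans hp.symm)

lemma pvTopk_perm (s t : List Int) (hp : s.Perm t) (k : Int) : pvTopk s k = pvTopk t k := by
  unfold pvTopk
  rw [pvSortedDesc_unique s (PySem.List.sorted t (fun g => g) true)
      ((PySem.List.sorted_perm t (fun g => g) true).trans hp.symm)
      (PySem.List.sorted_pairwise_rev t (fun g => g))]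

lemma pvTopk_nil (k : Int) : pvTopk [] k = 0 := by
  unfold pvTopk
  rw [pvSortedDesc_unique [] [] (List.Perm.refl _) (by simp)]
  simp

lemma pvTopk_nonpos (s : List Int) (k : Int) (hk : k ≤ 0) : pvTopk s k = 0 := by
  unfold pvTopk
  rw [Int.toNat_of_nonpos hk]
  simp

lemma pvTopk_all (s : List Int) (k : Int) (hk : (s.length : Int) ≤ k) : pvTopk s k = s.sum := by
  unfold pvTopk
  rw [List.take_of_length_le (by rw [PySem.List.length_sorted]; omega)]
  exact (PySem.List.sorted_perm s (fun g => g) true).sum_eq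

lemma pvTopk_cons_max (d : Int) (s : List Int) (k : Int)
    (hd : ∀ e ∈ s, e ≤ d) (hk : 0 < k) :
    pvTopk (d :: s) k = d + pvTopk s (k - 1) := by
  have hs : PySem.List.sorted (d :: s) (fun g => g) true = d :: PySem.List.sorted s (fun g => g) true := by
    refine pvSortedDesc_unique _ _ (List.Perm.cons d (PySem.List.sorted_perm s (fun g => g) true)) ?_
    rw [List.pairwise_cons]
    exact ⟨fun e he => hd e ((PySem.List.mem_sorted _ _ _ _).mp he),
      PySem.List.sorted_pairwise_rev s (fun g => g)⟩
  unfold pvTopk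
  rw [hs, show k.toNat = (k - 1).toNat + 1 by omega, List.take_succ_cons, List.sum_cons]

lemma pvTopk_cons_min (d : Int) (s : List Int) (k : Int)
    (hd : ∀ e ∈ s, d ≤ e) (hk : k ≤ (s.length : Int)) :
    pvTopk (d :: s) k = pvTopk s k := by
  have hs : PySem.List.sorted (d :: s) (fun g => g) true = PySem.List.sorted s (fun g => g) true ++ [d] := by
    refine pvSortedDesc_unique _ _
      ((List.perm_append_singleton d _).trans (List.Perm.cons d (PySem.List.sorted_perm s (fun g => g) true))) ?_
    rw [List.pairwise_append]
    refine ⟨PySem.List.sorted_pairwise_rev s (fun g => g), List.pairwise_singleton _ _, ?_⟩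
    intro e he d' hd'
    rw [List.mem_singleton] at hd'
    subst hd'
    exact hd e ((PySem.List.mem_sorted _ _ _ _).mp he)
  unfold pvTopk
  rw [hs, List.take_append_of_le_length (by rw [PySem.List.length_sorted]; omega)]

lemma pvSum_gains (L : List (Int × Int)) :
    (L.map (fun p => p.1 - p.2)).sum = (L.map Prod.fst).sum - (L.map Prod.snd).sum := by
  induction L with
  | nil => simp
  | cons h t ih => simp [ih]; ring

-- the heart: on a |gain|-descending list with valid caps, the greedy total is
-- the base (everything to B) plus the k largest gains
lemma pvGreedy_eq (L : List (Int × Int)) : ∀ (a b : Int), 0 ≤ a → 0 ≤ b →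
    (L.length : Int) ≤ a + b →
    L.Pairwise (fun p q => |q.1 - q.2| ≤ |p.1 - p.2|) →
    pvGreedy L a b = (L.map Prod.snd).sum +
      pvTopk (L.map (fun p => p.1 - p.2))
        (min a (max ((L.countP (fun p => decide (p.2 < p.1)) : Int)) ((L.length : Int) - b))) := by
  induction L with
  | nil => intro a b ha hb hlen hpw; simp [pvGreedy, pvTopk_nil]
  | cons hd t ih =>
    intro a b ha hb hlen hpw
    obtain ⟨x, y⟩ := hd
    rw [List.pairwise_cons] at hpw
    have hhead : ∀ q ∈ t, |q.1 - q.2| ≤ |x - y| := fun q hq => hpw.1 q hq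
    have htail := hpw.2
    have hlen' : (((x, y) :: t).length : Int) = (t.length : Int) + 1 := by simp
    have hcnt_le : (t.countP (fun p => decide (p.2 < p.1)) : Int) ≤ (t.length : Int) := by
      exact_mod_cast List.countP_le_length
    have hcnt_nn : (0 : Int) ≤ (t.countP (fun p => decide (p.2 < p.1)) : Int) := Int.natCast_nonneg _
    have hcLnn : (0 : Int) ≤ (((x, y) :: t).countP (fun p => decide (p.2 < p.1)) : Int) :=
      Int.natCast_nonneg _
    have eg : ((x, y) :: t).map (fun p => p.1 - p.2) = (x - y) :: t.map (fun p => p.1 - p.2) := rfl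
    have es : ((x, y) :: t).map Prod.snd = y :: t.map Prod.snd := rfl
    by_cases hb0 : b = 0
    · subst hb0
      rw [pvGreedy_b0 _ a]
      have hcL : (((x, y) :: t).countP (fun p => decide (p.2 < p.1)) : Int) ≤ (((x, y) :: t).length : Int) := by
        exact_mod_cast List.countP_le_length
      have hkk : min a (max ((((x, y) :: t).countP (fun p => decide (p.2 < p.1)) : Int)) ((((x, y) :: t).length : Int) - 0)) = (((x, y) :: t).length : Int) := by
        omega
      rw [hkk, pvTopk_all _ _ (by simp), pvSum_gains]
      ring
    · by_cases hc : y < x ∧ 0 < a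
      · have hg : pvGreedy ((x, y) :: t) a b = x + pvGreedy t (a - 1) b := by
          rw [pvGreedy, if_pos (Or.inl hc)]
        rw [hg, ih (a - 1) b (by omega) hb (by omega) htail]
        have hcnt : (((x, y) :: t).countP (fun p => decide (p.2 < p.1)) : Int)
            = (t.countP (fun p => decide (p.2 < p.1)) : Int) + 1 := by
          rw [List.countP_cons]
          simp [hc.1]
        have hmax : ∀ e ∈ t.map (fun p => p.1 - p.2), e ≤ x - y := by
          intro e he
          obtain ⟨q, hq, rfl⟩ := List.mem_map.mp he
          have h1 := hhead q hq
          have h2 : |x - y| = x - y := abs_of_pos (by omega)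
          have h3 : q.1 - q.2 ≤ |q.1 - q.2| := le_abs_self _
          omega
        have hkpos : 0 < min a (max ((((x, y) :: t).countP (fun p => decide (p.2 < p.1)) : Int)) ((((x, y) :: t).length : Int) - b)) := by
          omega
        rw [eg, es, List.sum_cons, pvTopk_cons_max (x - y) _ _ hmax hkpos]
        have hksub : min a (max ((((x, y) :: t).countP (fun p => decide (p.2 < p.1)) : Int)) ((((x, y) :: t).length : Int) - b)) - 1
            = min (a - 1) (max ((t.countP (fun p => decide (p.2 < p.1)) : Int)) ((t.length : Int) - b)) := by
          omega
        rw [hksub]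
        ring
      · have hg : pvGreedy ((x, y) :: t) a b = y + pvGreedy t a (b - 1) := by
          rw [pvGreedy, if_neg (by tauto)]
        rw [hg, ih a (b - 1) ha (by omega) (by omega) htail]
        by_cases hxy : y < x
        · -- here a = 0: both selections are empty
          have ha0 : a = 0 := by
            rcases (not_and_or.mp hc) with h | h
            · exact absurd hxy h
            · omega
          rw [pvTopk_nonpos _ _ (by omega), pvTopk_nonpos _ _ (by omega), es, List.sum_cons]
          ring
        · have hcnt : (((x, y) :: t).countP (fun p => decide (p.2 < p.1)) : Int)
              = (t.countP (fun p => decide (p.2 < p.1)) : Int) := by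
            rw [List.countP_cons]
            simp [hxy]
          have hmin : ∀ e ∈ t.map (fun p => p.1 - p.2), x - y ≤ e := by
            intro e he
            obtain ⟨q, hq, rfl⟩ := List.mem_map.mp he
            have h1 := hhead q hq
            have h2 : |x - y| = -(x - y) := abs_of_nonpos (by omega)
            have h3 : -|q.1 - q.2| ≤ q.1 - q.2 := neg_abs_le _
            omega
          rw [eg, es, List.sum_cons,
            pvTopk_cons_min (x - y) _ _ hmin (by rw [List.length_map]; omega)]
          have hkeq : min a (max ((((x, y) :: t).countP (fun p => decide (p.2 < p.1)) : Int)) ((((x, y) :: t).length : Int) - b))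
              = min a (max ((t.countP (fun p => decide (p.2 < p.1)) : Int)) ((t.length : Int) - (b - 1))) := by
            omega
          rw [hkeq]
          ring

-- ===== VERDICT (by name: the statement is the Claim_ definition above) =====
theorem maxTip_spec : Claim_equal_maxTip := by
  intro n a b arr brr _ hpre
  obtain ⟨ha, hb, hab, _, _⟩ := hpre
  unfold Spec_maxTip maxTip
  have hBalt : maxTip_alt n a b arr brr
      = ((PySem.List.pyRange 0 n 1).map (fun i => PySem.List.pyGetD brr i 0)).sum
        + (PySem.List.slice (PySem.List.sorted ((PySem.List.pyRange 0 n 1).map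
              (fun i => PySem.List.pyGetD arr i 0 - PySem.List.pyGetD brr i 0)) (fun g => g) true)
            none (some (min a (max (((PySem.List.sorted ((PySem.List.pyRange 0 n 1).map
              (fun i => PySem.List.pyGetD arr i 0 - PySem.List.pyGetD brr i 0)) (fun g => g) true).countP
                (fun g => decide (0 < g)) : Int)) (n - b))))).sum := rfl
  rw [hBalt]
  set T : List (Int × Int) :=
    (PySem.List.pyRange 0 n 1).map
      (fun i => (PySem.List.pyGetD arr i 0, PySem.List.pyGetD brr i 0)) with hT
  set S := PySem.List.sorted T (fun x => |x.1 - x.2|) true with hS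
  have hperm : S.Perm T := PySem.List.sorted_perm T (fun x => |x.1 - x.2|) true
  have hlenT : (T.length : Int) = ((n - 0).toNat : Int) := by
    simp [hT, PySem.List.length_pyRange_one]
  have hlenS : (S.length : Int) = (T.length : Int) := by
    rw [hS, PySem.List.length_sorted]
  rw [pvGreedy_foldl, zero_add,
    pvGreedy_eq S a b ha hb (by omega)
      (PySem.List.sorted_pairwise_rev T (fun x => |x.1 - x.2|))]
  -- identify B's gain list
  have hG : T.map (fun p => p.1 - p.2)
      = (PySem.List.pyRange 0 n 1).map
          (fun i => PySem.List.pyGetD arr i 0 - PySem.List.pyGetD brr i 0) := by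
    rw [hT, List.map_map]
    rfl
  have hGperm : (S.map (fun p => p.1 - p.2)).Perm (T.map (fun p => p.1 - p.2)) :=
    hperm.map _
  -- base: sum of brr over the range is the snd-sum of S
  have hbase : ((PySem.List.pyRange 0 n 1).map (fun i => PySem.List.pyGetD brr i 0)).sum
      = (S.map Prod.snd).sum := by
    have h1 : (S.map Prod.snd).sum = (T.map Prod.snd).sum := (hperm.map Prod.snd).sum_eq
    rw [h1, hT, List.map_map]
    rfl
  -- the positive-gain counts agree
  have hcntS : (S.countP (fun p => decide (p.2 < p.1)) : Int)
      = ((PySem.List.sorted ((PySem.List.pyRange 0 n 1).map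
            (fun i => PySem.List.pyGetD arr i 0 - PySem.List.pyGetD brr i 0))
          (fun g => g) true).countP (fun g => decide (0 < g)) : Int) := by
    have e1 : S.countP (fun p => decide (p.2 < p.1)) = T.countP (fun p => decide (p.2 < p.1)) :=
      hperm.countP_eq _
    have e2 : (PySem.List.sorted ((PySem.List.pyRange 0 n 1).map
            (fun i => PySem.List.pyGetD arr i 0 - PySem.List.pyGetD brr i 0))
          (fun g => g) true).countP (fun g => decide (0 < g))
        = (T.map (fun p => p.1 - p.2)).countP (fun g => decide (0 < g)) := by
      rw [hG]
      exact (PySem.List.sorted_perm _ (fun g => g) true).countP_eq _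
    have e3 : (T.map (fun p => p.1 - p.2)).countP (fun g => decide (0 < g))
        = T.countP (fun p => decide (p.2 < p.1)) := by
      rw [List.countP_map]
      refine List.countP_congr ?_
      intro p _
      simp only [Function.comp, decide_eq_true_eq]
      constructor <;> (intro h; omega)
    rw [e1, e2, e3]
  have hcnt_nn : (0 : Int) ≤ (S.countP (fun p => decide (p.2 < p.1)) : Int) := Int.natCast_nonneg _
  have hcnt_le : (S.countP (fun p => decide (p.2 < p.1)) : Int) ≤ (S.length : Int) := by
    exact_mod_cast List.countP_le_length
  -- the two selection sizes agree
  have hk : min a (max ((S.countP (fun p => decide (p.2 < p.1)) : Int)) ((S.length : Int) - b))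
      = min a (max (((PySem.List.sorted ((PySem.List.pyRange 0 n 1).map
            (fun i => PySem.List.pyGetD arr i 0 - PySem.List.pyGetD brr i 0))
          (fun g => g) true).countP (fun g => decide (0 < g)) : Int)) (n - b)) := by
    omega
  have hk0 : 0 ≤ min a (max (((PySem.List.sorted ((PySem.List.pyRange 0 n 1).map
            (fun i => PySem.List.pyGetD arr i 0 - PySem.List.pyGetD brr i 0))
          (fun g => g) true).countP (fun g => decide (0 < g)) : Int)) (n - b)) := by
    have := Int.natCast_nonneg ((PySem.List.sorted ((PySem.List.pyRange 0 n 1).map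
            (fun i => PySem.List.pyGetD arr i 0 - PySem.List.pyGetD brr i 0))
          (fun g => g) true).countP (fun g => decide (0 < g)))
    omega
  rw [hk, PySem.List.slice_to _ hk0, hbase, pvTopk_perm _ _ hGperm, hG]
  rfl
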